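-- pv_equiv track=rewrite | github.com/great-rain/coding_test | baekjoon/심화2/통계학.py | ModeValue
-- ===== SOURCE A (Python) =====
-- def ModeValue(numbers: list) -> int:
--     count = {}
--     for i in numbers:
--         count[i] = count.get(i, 0) + 1
--
--     # 최대 빈도 찾기
--     max_count = max(count.values())
--
--     # 최빈값들을 오름차순으로 정렬
--     modes = sorted([num for num, cnt in count.items() if cnt == max_count])
--
--     # 최빈값이 하나면 그것을, 여러 개면 두 번째로 작은 값을 반환
--     if len(modes) == 1:
--         return modes[0]
--     else:
--         return modes[1]
-- ===== SOURCE B (Python) =====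
-- def ModeValue(numbers: list) -> int:
--     # Sort once, then a single pass over runs of equal values; no dict.
--     s = sorted(numbers)
--     runs = []
--     i = 0
--     n = len(s)
--     while i < n:
--         j = i
--         while j < n and s[j] == s[i]:
--             j += 1
--         runs.append((s[i], j - i))
--         i = j
--     best = 0
--     firsts = []
--     for v, r in runs:
--         if r > best:
--             best = r
--             firsts = [v]
--         elif r == best and len(firsts) < 2:
--             firsts.append(v)
--     return firsts[0] if len(firsts) == 1 else firsts[1]
-- ===== Notes on version B (the rewrite author's own statement) =====
-- stated objective: alternative
-- what changed: B replaces A's dict-counting plus sort-of-the-modes with sort-the-input-first and a single run-length scan over the sorted list, keeping only the best run length and the first two maximal values; Pre_ excludes only the empty list, on which both A and B raise.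
import Mathlib
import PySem

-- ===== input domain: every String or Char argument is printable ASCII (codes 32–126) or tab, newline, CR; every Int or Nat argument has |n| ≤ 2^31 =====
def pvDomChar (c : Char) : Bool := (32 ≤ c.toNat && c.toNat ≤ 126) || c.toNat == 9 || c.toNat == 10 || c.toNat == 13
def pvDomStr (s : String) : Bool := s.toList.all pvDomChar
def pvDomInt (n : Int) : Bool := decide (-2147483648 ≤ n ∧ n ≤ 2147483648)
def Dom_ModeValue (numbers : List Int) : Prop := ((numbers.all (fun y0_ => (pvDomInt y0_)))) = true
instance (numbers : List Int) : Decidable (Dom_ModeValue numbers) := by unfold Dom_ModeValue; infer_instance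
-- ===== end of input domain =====

-- B replaces A's dict-counting-plus-sort-of-the-modes by sorting the input once and scanning
-- runs of equal values in a single pass (objective: alternative algorithm, same O(n log n) cost).

-- ===== PORT A =====
def ModeValue (numbers : List Int) : Int :=
  -- count = {}; for i in numbers: count[i] = count.get(i, 0) + 1
  let count : PySem.Dict Int Int :=
    numbers.foldl (fun d i => d.insert i (d.getD i 0 + 1)) PySem.Dict.empty
  -- max_count = max(count.values())   (raises ValueError on [] — excluded by Pre_; the .getD 0 is never reached there)
  let maxCount : Int := (PySem.List.max? count.values (fun v => v)).getD 0
  -- modes = sorted([num for num, cnt in count.items() if cnt == max_count])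
  let modes : List Int :=
    PySem.List.sorted ((count.items.filter (fun p => p.2 == maxCount)).map Prod.fst) (fun x => x) false
  if modes.length == 1 then PySem.List.pyGetD modes (0 : Int) 0
  else PySem.List.pyGetD modes (1 : Int) 0

-- ===== PORT B =====
-- the inner while loop of Source B: one run (value, length) at a time, continuing past it
def runsOf : List Int → List (Int × Int)
  | [] => []
  | x :: rest =>
    (x, ((rest.takeWhile (· == x)).length : Int) + 1) :: runsOf (rest.dropWhile (· == x))
termination_by l => l.length
decreasing_by
  simp only [List.length_cons]
  exact Nat.lt_succ_of_le (List.length_dropWhile_le _ _)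

def ModeValue_alt (numbers : List Int) : Int :=
  let s := PySem.List.sorted numbers (fun x => x) false
  let runs := runsOf s
  -- for v, r in runs: track best run length and the first (≤ 2) values attaining it
  let st := runs.foldl
    (fun (st : Int × List Int) p =>
      if p.2 > st.1 then (p.2, [p.1])
      else if p.2 == st.1 && decide (st.2.length < 2) then (st.1, st.2 ++ [p.1])
      else st) ((0 : Int), ([] : List Int))
  let firsts := st.2
  -- firsts[0] if len(firsts) == 1 else firsts[1]   (raises IndexError on [] — excluded by Pre_)
  if firsts.length == 1 then PySem.List.pyGetD firsts (0 : Int) 0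
  else PySem.List.pyGetD firsts (1 : Int) 0

-- ===== PRECONDITION & SPEC =====
-- Pre_ excludes exactly the empty list: there Python A raises ValueError (max() of an empty
-- sequence) and Python B raises IndexError; on every other input both return.
def Pre_ModeValue (numbers : List Int) : Prop := numbers ≠ []
instance (numbers : List Int) : Decidable (Pre_ModeValue numbers) := by unfold Pre_ModeValue; infer_instance
def pvWitness_ModeValue : List Int := [3, 1, 3, 1, 2]

def Spec_ModeValue (numbers : List Int) (out : Int) : Prop := out = ModeValue_alt numbers
instance (numbers : List Int) (out : Int) : Decidable (Spec_ModeValue numbers out) := by unfold Spec_ModeValue; infer_instance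

-- ===== CLAIM (what is proved, stated in full; the proofs are below) =====
def Claim_equal_ModeValue : Prop := ∀ (numbers : List Int), Dom_ModeValue numbers → Pre_ModeValue numbers → Spec_ModeValue numbers (ModeValue numbers)

-- ===== LEMMAS AND PROOFS =====

-- B's accumulator loop over a run list, characterised in closed form: the final best is the
-- running max of the run lengths, and the final firsts are the first two values whose run
-- length attains it (appended to the old firsts when nothing beats the old best).
theorem fold_runs (rs : List (Int × Int)) (best : Int) (firsts : List Int) (hf : firsts.length ≤ 2) :
    rs.foldl (fun (st : Int × List Int) p =>
      if p.2 > st.1 then (p.2, [p.1])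
      else if p.2 == st.1 && decide (st.2.length < 2) then (st.1, st.2 ++ [p.1])
      else st) (best, firsts)
    = ((rs.map Prod.snd).foldl max best,
       ((if (rs.map Prod.snd).foldl max best = best then firsts else []) ++
        ((rs.filter (fun p => p.2 == (rs.map Prod.snd).foldl max best)).map Prod.fst)).take 2) := by
  induction rs generalizing best firsts with
  | nil => simp [List.take_of_length_le hf]
  | cons p t ih =>
    simp only [List.foldl_cons, List.map_cons, List.filter_cons]
    have hmax := (PySem.List.le_foldl_max (t.map Prod.snd) (max best p.2)).1
    by_cases h1 : p.2 > best
    · rw [if_pos h1, ih p.2 [p.1] (by simp)]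
      simp only [max_eq_right h1.le] at hmax ⊢
      have hne : ¬ (t.map Prod.snd).foldl max p.2 = best := by omega
      rw [if_neg hne]
      by_cases hC : p.2 = (t.map Prod.snd).foldl max p.2
      · rw [if_pos (by omega : (t.map Prod.snd).foldl max p.2 = p.2)]
        simp [← hC]
      · rw [if_neg (by omega : ¬ (t.map Prod.snd).foldl max p.2 = p.2)]
        simp [hC]
    · rw [if_neg h1]
      have hm : max best p.2 = best := by omega
      simp only [hm] at hmax ⊢
      by_cases h2 : p.2 = best
      · by_cases h3 : firsts.length < 2
        · rw [if_pos (by simp [h2, h3])]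
          rw [ih best (firsts ++ [p.1]) (by simp; omega)]
          by_cases hC : (t.map Prod.snd).foldl max best = best
          · simp [hC, h2, List.append_assoc]
          · simp [hC, h2]
            split_ifs with h4
            · exact absurd h4.symm hC
            · rfl
        · rw [if_neg (by simp [h3])]
          rw [ih best firsts hf]
          have hf2 : firsts.length = 2 := by omega
          by_cases hC : (t.map Prod.snd).foldl max best = best
          · simp [hC, h2, hf2]
          · simp [hC, h2]
            split_ifs with h4
            · exact absurd h4.symm hC
            · rfl
      · rw [if_neg (by simp [h2])]
        rw [ih best firsts hf]
        have hne : ¬ p.2 = (t.map Prod.snd).foldl max best := by omega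
        simp [hne]

-- On a sorted list, runsOf lists each distinct value once, with its multiplicity,
-- in strictly increasing order of value.
theorem runsOf_spec : ∀ (s : List Int), s.Pairwise (· ≤ ·) →
    (∀ p ∈ runsOf s, p.1 ∈ s ∧ p.2 = (s.count p.1 : Int)) ∧
    (∀ v ∈ s, (v, (s.count v : Int)) ∈ runsOf s) ∧
    ((runsOf s).map Prod.fst).Pairwise (· < ·) := by
  intro s
  induction s using runsOf.induct with
  | case1 => simp [runsOf]
  | case2 x rest ih =>
    intro hp
    have hsplit : rest.takeWhile (· == x) ++ rest.dropWhile (· == x) = rest :=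
      List.takeWhile_append_dropWhile
    have hxle : ∀ y ∈ rest, x ≤ y := (List.pairwise_cons.mp hp).1
    have hrp : rest.Pairwise (· ≤ ·) := (List.pairwise_cons.mp hp).2
    have hsame : ∀ y ∈ rest.takeWhile (· == x), y = x := by
      intro y hy
      simpa using List.mem_takeWhile_imp hy
    have hdp : (rest.dropWhile (· == x)).Pairwise (· ≤ ·) :=
      hrp.sublist (List.dropWhile_sublist _)
    have hlt : ∀ y ∈ rest.dropWhile (· == x), x < y := by
      intro y hy
      cases hd : rest.dropWhile (· == x) with
      | nil => simp [hd] at hy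
      | cons h t =>
        have hne' : rest.dropWhile (· == x) ≠ [] := by simp [hd]
        have hh0 := List.head_dropWhile_not (fun y => y == x) hne'
        have hh1 : (rest.dropWhile (· == x)).head hne' = h := by
          have h3 := List.head?_eq_some_head hne'
          have h4 : (rest.dropWhile (· == x)).head? = some h := by rw [hd]; rfl
          rw [h4] at h3
          exact (Option.some_inj.mp h3).symm
        rw [hh1] at hh0
        have hh : h ≠ x := by simpa using hh0
        have hhx : x < h := by
          have hhm : h ∈ rest := (List.dropWhile_sublist (· == x)).subset
            (by rw [hd]; exact List.mem_cons_self)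
          rcases lt_or_eq_of_le (hxle h hhm) with h' | h'
          · exact h'
          · exact absurd h'.symm hh
        rw [hd] at hy
        rcases List.mem_cons.mp hy with rfl | hy
        · exact hhx
        · have : h ≤ y := ((List.pairwise_cons.mp (hd ▸ hdp)).1) y hy
          omega
    have hxnot : x ∉ rest.dropWhile (· == x) := fun h => absurd rfl (ne_of_lt (hlt x h)).symm
    have hrest_x : rest.count x = (rest.takeWhile (· == x)).length := by
      conv_lhs => rw [← hsplit]
      rw [List.count_append, List.count_eq_length.mpr (fun b hb => (hsame b hb).symm),
          List.count_eq_zero.mpr hxnot]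
      omega
    have hcx : (x :: rest).count x = (rest.takeWhile (· == x)).length + 1 := by
      rw [List.count_cons_self, hrest_x]
    have hcother : ∀ v, v ≠ x → (x :: rest).count v = (rest.dropWhile (· == x)).count v := by
      intro v hv
      have h1 : rest.count v = (rest.dropWhile (· == x)).count v := by
        conv_lhs => rw [← hsplit]
        rw [List.count_append, List.count_eq_zero.mpr (fun h => hv (hsame v h))]
        omega
      rw [List.count_cons]
      simp [h1, Ne.symm hv]
    obtain ⟨ih1, ih2, ih3⟩ := ih hdp
    have hhead : ((x :: rest).count x : Int) = ((rest.takeWhile (· == x)).length : Int) + 1 := by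
      rw [hcx]; push_cast; ring
    refine ⟨?_, ?_, ?_⟩
    · intro p hp'
      rw [runsOf] at hp'
      rcases List.mem_cons.mp hp' with rfl | hp'
      · exact ⟨List.mem_cons_self, by simpa using hhead.symm⟩
      · obtain ⟨hm, hc⟩ := ih1 p hp'
        have hne : p.1 ≠ x := (ne_of_lt (hlt _ hm)).symm
        exact ⟨List.mem_cons.mpr (Or.inr ((List.dropWhile_sublist _).subset hm)),
               by rw [hcother p.1 hne]; exact hc⟩
    · intro v hv
      have hmem_head : (v = x) → ((v, ((x :: rest).count v : Int)) ∈ runsOf (x :: rest)) := by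
        rintro rfl
        rw [runsOf]
        have : ((v, ((v :: rest).count v : Int)) : Int × Int)
             = (v, ((rest.takeWhile (· == v)).length : Int) + 1) := by
          rw [hhead]
        rw [this]
        exact List.mem_cons_self
      rcases List.mem_cons.mp hv with rfl | hv
      · exact hmem_head rfl
      · rw [← hsplit] at hv
        rcases List.mem_append.mp hv with hv | hv
        · exact hmem_head (hsame v hv)
        · have hne : v ≠ x := (ne_of_lt (hlt _ hv)).symm
          rw [runsOf]
          refine List.mem_cons.mpr (Or.inr ?_)
          rw [hcother v hne]
          exact ih2 v hv
    · rw [runsOf]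
      simp only [List.map_cons]
      refine List.pairwise_cons.mpr ⟨?_, ih3⟩
      intro y hy
      simp only [List.mem_map] at hy
      obtain ⟨p, hp', rfl⟩ := hy
      exact hlt _ (ih1 p hp').1

-- ===== VERDICT (by name: the statement is the Claim_ definition above) =====
theorem ModeValue_spec : Claim_equal_ModeValue := by
  intro numbers _ hpre
  unfold Spec_ModeValue ModeValue ModeValue_alt
  -- notation
  set s := PySem.List.sorted numbers (fun x => x) false with hs
  have hsp : s.Pairwise (· ≤ ·) := PySem.List.sorted_pairwise numbers _
  have hperm : s.Perm numbers := PySem.List.sorted_perm numbers _ _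
  obtain ⟨hr1, hr2, hr3⟩ := runsOf_spec s hsp
  have hcounteq : ∀ v : Int, s.count v = numbers.count v := fun v => hperm.count_eq v
  have hmemeq : ∀ v : Int, v ∈ s ↔ v ∈ numbers := fun v => hperm.mem_iff
  -- A's dict is Counter(numbers)
  have hdict : numbers.foldl (fun d i => d.insert i (d.getD i 0 + 1)) PySem.Dict.empty
      = PySem.Dict.counter numbers := PySem.Dict.foldl_insert_getD_add_one_eq_counter numbers
  have hitems : (PySem.Dict.counter numbers).items
      = (PySem.Set.ofList numbers).map (fun k => (k, (numbers.count k : Int))) :=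
    PySem.Dict.items_counter numbers
  have hvals : (PySem.Dict.counter numbers).values
      = (PySem.Set.ofList numbers).map (fun k => (numbers.count k : Int)) := by
    show (PySem.Dict.counter numbers).items.map (·.2) = _
    rw [hitems, List.map_map]
    rfl
  -- the max exists (numbers ≠ [])
  have hvne : (PySem.Dict.counter numbers).values ≠ [] := by
    rw [hvals]
    cases hn : numbers with
    | nil => exact absurd hn hpre
    | cons a t =>
      intro h
      rcases List.map_eq_nil_iff.mp h with h'
      have ha : a ∈ PySem.Set.ofList (a :: t) := (PySem.Set.mem_ofList _ a).mpr (by simp)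
      rw [h'] at ha
      simp at ha
  obtain ⟨m, hm⟩ : ∃ m, PySem.List.max? (PySem.Dict.counter numbers).values (fun v => v) = some m := by
    cases hmx : PySem.List.max? (PySem.Dict.counter numbers).values (fun v => v) with
    | none => exact absurd ((PySem.List.max?_eq_none_iff _ _).mp hmx) hvne
    | some m => exact ⟨m, rfl⟩
  have hm_mem := PySem.List.max?_mem hm
  have hm_max := PySem.List.max?_isMax hm
  -- m is attained and dominates all counts
  obtain ⟨v0, hv0mem, hv0⟩ : ∃ v0, v0 ∈ numbers ∧ (numbers.count v0 : Int) = m := by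
    rw [hvals] at hm_mem
    obtain ⟨k, hk, hkm⟩ := List.mem_map.mp hm_mem
    exact ⟨k, (PySem.Set.mem_ofList numbers k).mp hk, hkm⟩
  have hdom : ∀ v ∈ numbers, (numbers.count v : Int) ≤ m := by
    intro v hv
    have : (numbers.count v : Int) ∈ (PySem.Dict.counter numbers).values := by
      rw [hvals]
      exact List.mem_map.mpr ⟨v, (PySem.Set.mem_ofList numbers v).mpr hv, rfl⟩
    simpa using hm_max _ this
  -- B's running max over the run lengths equals m
  have hBle : ((runsOf s).map Prod.snd).foldl max 0 ≤ m := by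
    rcases PySem.List.foldl_max_mem ((runsOf s).map Prod.snd) 0 with h0 | hmem
    · rw [h0]
      have := hv0mem
      have h1 : (0:Int) < (numbers.count v0 : Int) := by
        have := List.count_pos_iff.mpr hv0mem
        exact_mod_cast this
      omega
    · obtain ⟨p, hp, hps⟩ := List.mem_map.mp hmem
      obtain ⟨hp1, hp2⟩ := hr1 p hp
      rw [← hps, hp2, hcounteq]
      exact hdom p.1 ((hmemeq p.1).mp hp1)
  have hmleB : m ≤ ((runsOf s).map Prod.snd).foldl max 0 := by
    have hv0s : v0 ∈ s := (hmemeq v0).mpr hv0mem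
    have hrun := hr2 v0 hv0s
    have : (s.count v0 : Int) ∈ (runsOf s).map Prod.snd :=
      List.mem_map.mpr ⟨(v0, (s.count v0 : Int)), hrun, rfl⟩
    have h2 := (PySem.List.le_foldl_max ((runsOf s).map Prod.snd) 0).2 _ this
    rw [hcounteq, hv0] at h2
    exact h2
  have hmB : ((runsOf s).map Prod.snd).foldl max 0 = m := le_antisymm hBle hmleB
  -- the ascending list of modes
  set ys : List Int := ((runsOf s).filter (fun p => p.2 == m)).map Prod.fst with hys
  have hys_pw : ys.Pairwise (· < ·) :=
    hr3.sublist (List.Sublist.map Prod.fst List.filter_sublist)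
  have hys_nd : ys.Nodup := hys_pw.imp (fun h => ne_of_lt h)
  have hys_mem : ∀ v, v ∈ ys ↔ (v ∈ numbers ∧ (numbers.count v : Int) = m) := by
    intro v
    constructor
    · intro hv
      obtain ⟨p, hp, rfl⟩ := List.mem_map.mp hv
      obtain ⟨hp', hpm⟩ := List.mem_filter.mp hp
      obtain ⟨hp1, hp2⟩ := hr1 p hp'
      refine ⟨(hmemeq p.1).mp hp1, ?_⟩
      rw [← hcounteq, ← hp2]
      exact (beq_iff_eq).mp hpm
    · rintro ⟨hv, hc⟩
      have hvs : v ∈ s := (hmemeq v).mpr hv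
      have hrun := hr2 v hvs
      have : (v, (s.count v : Int)) ∈ (runsOf s).filter (fun p => p.2 == m) :=
        List.mem_filter.mpr ⟨hrun, by rw [hcounteq]; simpa using hc⟩
      exact List.mem_map.mpr ⟨_, this, rfl⟩
  -- A's modes list equals ys
  have hL0 : ((PySem.Dict.counter numbers).items.filter (fun p => p.2 == m)).map Prod.fst
      = (PySem.Set.ofList numbers).filter (fun v => (numbers.count v : Int) == m) := by
    rw [hitems, List.filter_map, List.map_map]
    simp [Function.comp_def]
  have hL0_nd : ((PySem.Set.ofList numbers).filter (fun v => (numbers.count v : Int) == m) : List Int).Nodup :=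
    (PySem.Set.nodup_ofList numbers).filter _
  have hperm_ys : ys.Perm ((PySem.Set.ofList numbers).filter (fun v => (numbers.count v : Int) == m)) := by
    rw [List.perm_ext_iff_of_nodup hys_nd hL0_nd]
    intro v
    rw [hys_mem v, List.mem_filter]
    simp [PySem.Set.mem_ofList]
  have hsorted_ys :
      PySem.List.sorted ((PySem.Set.ofList numbers).filter (fun v => (numbers.count v : Int) == m))
        (fun x => x) false = ys :=
    PySem.List.sorted_eq_of_perm_of_pairwise_lt _ _ _ hperm_ys hys_pw
  have hys_ne : ys ≠ [] := by
    intro h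
    have : v0 ∈ ys := (hys_mem v0).mpr ⟨hv0mem, hv0⟩
    simp [h] at this
  -- rewrite both sides
  simp only [hdict, hm, Option.getD_some, hL0, hsorted_ys,
    fold_runs (runsOf s) 0 [] (by simp), hmB, ite_self, List.nil_append]
  rw [← hys]
  clear_value s
  clear_value ys
  -- final comparison: modes = ys on the left, firsts = ys.take 2 on the right
  cases ys with
  | nil => exact absurd rfl hys_ne
  | cons a t =>
    cases t with
    | nil => simp [pysem]
    | cons b t' =>
      have hlen : ¬ ((a :: b :: t').length == 1) = true := by simp
      have hlen2 : ¬ (((a :: b :: t').take 2).length == 1) = true := by simp [List.take]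
      rw [if_neg hlen, if_neg hlen2]
      simp [pysem, List.take]
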